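-- pv_equiv track=rewrite | github.com/koorifukai/HumbleRayTracer | main.py | highlight_surface_edge
-- ===== SOURCE A (Python) =====
-- from collections import Counter
--
-- def highlight_surface_edge(coords):
--     # Dictionary to store edge counts
--     edge_counts = Counter()
--     # Process each facet to extract edges
--     for facet in coords:
--         # Extract all edges from the facet
--         edges = [
--             (facet[0], facet[1]),
--             (facet[1], facet[2]),
--             (facet[2], facet[3]),
--             (facet[3], facet[0]),
--         ]
--         # Normalize each edge to avoid duplicates (e.g., (v1, v2) and (v2, v1))
--         for edge in edges:
--             # Sort vertices in the edge to have a consistent order (v1, v2) where v1 < v2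
--             normalized_edge = tuple(sorted(edge))
--             # Update the counter
--             edge_counts[normalized_edge] += 1
--
--     # Find edges that have only been visited once
--     single_visit_edges = [edge for edge, count in edge_counts.items() if count == 1]
--     return single_visit_edges
-- ===== SOURCE B (Python) =====
-- def highlight_surface_edge(coords):
--     # Single pass: keep currently-unique edges in an insertion-ordered dict,
--     # edges seen twice or more in a set; toggle membership as edges recur.
--     unique = {}
--     duplicated = set()
--     for facet in coords:
--         edges = (
--             (facet[0], facet[1]),
--             (facet[1], facet[2]),
--             (facet[2], facet[3]),
--             (facet[3], facet[0]),
--         )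
--         for edge in edges:
--             e = tuple(sorted(edge))
--             if e in unique:
--                 del unique[e]
--                 duplicated.add(e)
--             elif e in duplicated:
--                 continue
--             else:
--                 unique[e] = True
--     return list(unique)
-- ===== Notes on version B (the rewrite author's own statement) =====
-- stated objective: alternative
-- what changed: Replaces the Counter-then-filter two-phase structure with a single toggling pass that maintains an insertion-ordered dict of currently-unique edges plus a set of duplicated edges, returning the dict's keys directly.
import Mathlib
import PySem

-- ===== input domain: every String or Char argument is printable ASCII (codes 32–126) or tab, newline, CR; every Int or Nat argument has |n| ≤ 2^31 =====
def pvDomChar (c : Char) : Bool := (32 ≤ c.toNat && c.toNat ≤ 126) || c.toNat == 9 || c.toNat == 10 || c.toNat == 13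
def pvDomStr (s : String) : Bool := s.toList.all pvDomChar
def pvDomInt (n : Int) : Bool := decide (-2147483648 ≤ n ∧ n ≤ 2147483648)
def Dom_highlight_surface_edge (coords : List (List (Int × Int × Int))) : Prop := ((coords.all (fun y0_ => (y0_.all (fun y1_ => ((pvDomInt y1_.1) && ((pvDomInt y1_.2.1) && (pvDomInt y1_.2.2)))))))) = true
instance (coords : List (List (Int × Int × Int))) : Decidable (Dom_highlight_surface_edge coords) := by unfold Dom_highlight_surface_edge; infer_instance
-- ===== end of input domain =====

-- B replaces the Counter-then-filter structure by a single toggling pass that maintains the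
-- currently-unique edges in an insertion-ordered dict plus a set of duplicated edges (objective: alternative).

-- ===== PORT A =====
-- Python's lexicographic '<' on 3-tuples of ints (hand port, exact on this type)
def pvLt (a b : Int × Int × Int) : Bool :=
  a.1 < b.1 || (a.1 == b.1 && (a.2.1 < b.2.1 || (a.2.1 == b.2.1 && a.2.2 < b.2.2)))

-- tuple(sorted(edge)) for a 2-element edge: stable, so swap exactly when the second is lex-smaller (exact)
def pvNorm (e : (Int × Int × Int) × (Int × Int × Int)) : List (Int × Int × Int) :=
  if pvLt e.2 e.1 then [e.2, e.1] else [e.1, e.2]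

-- facet[0..3]; none = IndexError (excluded by Pre_)
def pvEdges? (facet : List (Int × Int × Int)) :
    Option (List ((Int × Int × Int) × (Int × Int × Int))) :=
  match PySem.List.pyGet? facet 0, PySem.List.pyGet? facet 1,
        PySem.List.pyGet? facet 2, PySem.List.pyGet? facet 3 with
  | some a, some b, some c, some d => some [(a, b), (b, c), (c, d), (d, a)]
  | _, _, _, _ => none

def highlight_surface_edge (coords : List (List (Int × Int × Int))) : List (List (Int × Int × Int)) :=
  -- edge_counts = Counter built over the facets, then the count-1 filter
  (((coords.foldl (fun d facet =>
      match pvEdges? facet with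
      | some edges => edges.foldl (fun d e => d.modify (pvNorm e) 0 (· + 1)) d
      | none => d) (PySem.Dict.empty : PySem.Dict (List (Int × Int × Int)) Int)).items.filter
    (fun p => p.2 == 1)).map (fun p => p.1))

-- ===== PORT B =====
-- one step of B's toggle: unique-dict × duplicated-set
def pvBStep (st : PySem.Dict (List (Int × Int × Int)) Bool × PySem.Set (List (Int × Int × Int)))
    (e : List (Int × Int × Int)) :
    PySem.Dict (List (Int × Int × Int)) Bool × PySem.Set (List (Int × Int × Int)) :=
  if st.1.contains e then (st.1.erase e, PySem.Set.add st.2 e)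
  else if PySem.Set.contains st.2 e then st
  else (st.1.insert e true, st.2)

def highlight_surface_edge_alt (coords : List (List (Int × Int × Int))) : List (List (Int × Int × Int)) :=
  (coords.foldl (fun st facet =>
      match pvEdges? facet with
      | some edges => edges.foldl (fun st e => pvBStep st (pvNorm e)) st
      | none => st) ((PySem.Dict.empty, PySem.Set.empty) :
        PySem.Dict (List (Int × Int × Int)) Bool × PySem.Set (List (Int × Int × Int)))).1.keys

-- ===== PRECONDITION & SPEC =====
-- Pre_ excludes exactly the facets shorter than 4 vertices, on which A raises IndexError at facet[3]
def Pre_highlight_surface_edge (coords : List (List (Int × Int × Int))) : Prop :=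
  ∀ facet ∈ coords, 4 ≤ facet.length
instance (coords : List (List (Int × Int × Int))) : Decidable (Pre_highlight_surface_edge coords) := by
  unfold Pre_highlight_surface_edge; infer_instance

def pvWitness_highlight_surface_edge : (List (List (Int × Int × Int))) :=
  [[(0, 0, 0), (1, 0, 0), (1, 1, 0), (0, 1, 0)]]

def Spec_highlight_surface_edge (coords : List (List (Int × Int × Int))) (out : List (List (Int × Int × Int))) : Prop := out = highlight_surface_edge_alt coords
instance (coords : List (List (Int × Int × Int))) (out : List (List (Int × Int × Int))) : Decidable (Spec_highlight_surface_edge coords out) := by unfold Spec_highlight_surface_edge; infer_instance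

-- ===== CLAIM (what is proved, stated in full; the proofs are below) =====
def Claim_equal_highlight_surface_edge : Prop := ∀ (coords : List (List (Int × Int × Int))), Dom_highlight_surface_edge coords → Pre_highlight_surface_edge coords → Spec_highlight_surface_edge coords (highlight_surface_edge coords)

-- ===== LEMMAS AND PROOFS =====

-- the flat list of normalized edges that both loops process
def pvE (coords : List (List (Int × Int × Int))) : List (List (Int × Int × Int)) :=
  coords.flatMap (fun f => ((pvEdges? f).getD []).map pvNorm)

lemma pvEdges?_of_len {facet : List (Int × Int × Int)} (h : 4 ≤ facet.length) :
    ∃ a b c d t, facet = a :: b :: c :: d :: t ∧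
      pvEdges? facet = some [(a, b), (b, c), (c, d), (d, a)] := by
  match facet, h with
  | a :: b :: c :: d :: t, _ =>
    exact ⟨a, b, c, d, t, rfl, by
      simp only [pvEdges?, PySem.List.pyGet?, PySem.List.pyIdx?, List.length_cons]
      norm_num
      rw [if_pos (by omega), if_pos (by omega), if_pos (by omega), if_pos (by omega)]
      rfl⟩

-- both nested loops are the fold of their step over pvE coords
lemma foldl_facets {σ : Type} (step : σ → List (Int × Int × Int) → σ)
    (coords : List (List (Int × Int × Int))) (h : ∀ f ∈ coords, 4 ≤ f.length) (init : σ) :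
    coords.foldl (fun s f =>
      match pvEdges? f with
      | some edges => edges.foldl (fun s e => step s (pvNorm e)) s
      | none => s) init
    = (pvE coords).foldl step init := by
  induction coords generalizing init with
  | nil => rfl
  | cons f rest ih =>
    obtain ⟨a, b, c, d, t, rfl, he⟩ := pvEdges?_of_len (h f (by simp))
    simp only [List.foldl_cons, pvE, List.flatMap_cons, List.foldl_append, he,
      Option.getD_some, List.foldl_map]
    exact ih (fun g hg => h g (by simp [hg])) _

lemma A_closed (coords : List (List (Int × Int × Int))) (h : ∀ f ∈ coords, 4 ≤ f.length) :
    highlight_surface_edge coords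
      = (PySem.Set.ofList (pvE coords)).filter (fun k => ((pvE coords).count k : Int) == 1) := by
  unfold highlight_surface_edge
  rw [foldl_facets (σ := PySem.Dict (List (Int × Int × Int)) Int) (fun d e => d.modify e 0 (· + 1)) coords h PySem.Dict.empty]
  rw [← PySem.Dict.counter_eq_foldl, PySem.Dict.items_counter, List.filter_map, List.map_map]
  simp only [Function.comp_def]
  simp

lemma B_inv (E : List (List (Int × Int × Int))) :
    (E.foldl pvBStep (PySem.Dict.empty, PySem.Set.empty)).1.items
      = ((PySem.Set.ofList E).filter (fun k => E.count k == 1)).map (fun k => (k, true))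
    ∧ ∀ k, k ∈ (E.foldl pvBStep (PySem.Dict.empty, PySem.Set.empty)).2 ↔ 2 ≤ E.count k := by
  induction E using List.reverseRecOn with
  | nil => exact ⟨rfl, by simp [PySem.Set.empty]⟩
  | append_singleton l e ih =>
    obtain ⟨hu, hd⟩ := ih
    rw [List.foldl_append, List.foldl_cons, List.foldl_nil]
    set p := l.foldl pvBStep (PySem.Dict.empty, PySem.Set.empty) with hp
    have hS : PySem.Set.ofList (l ++ [e]) = PySem.Set.add (PySem.Set.ofList l) e := by
      rw [PySem.Set.ofList_eq_foldl, PySem.Set.ofList_eq_foldl, List.foldl_append,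
        List.foldl_cons, List.foldl_nil]
    have hc : p.1.contains e = true ↔ l.count e = 1 := by
      simp only [PySem.Dict.contains, hu, List.any_map, Function.comp_def, List.any_eq_true,
        List.mem_filter, PySem.Set.mem_ofList, beq_iff_eq]
      constructor
      · rintro ⟨x, ⟨-, hx⟩, rfl⟩; exact hx
      · intro hx; exact ⟨e, ⟨List.count_pos_iff.mp (by omega), hx⟩, rfl⟩
    have hs : PySem.Set.contains p.2 e = true ↔ 2 ≤ l.count e := by
      rw [PySem.Set.contains_iff]
      exact hd e
    by_cases h1 : l.count e = 1
    · -- second occurrence: toggle out of unique, into duplicated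
      have hb1 : p.1.contains e = true := hc.mpr h1
      have he_l : e ∈ l := List.count_pos_iff.mp (by omega)
      have hb2 : PySem.Set.contains p.2 e = false := by
        cases hcc : PySem.Set.contains p.2 e
        · rfl
        · exact absurd (hs.mp hcc) (by omega)
      have hadd : PySem.Set.add (PySem.Set.ofList l) e = PySem.Set.ofList l := by
        rw [PySem.Set.add, if_pos ((PySem.Set.contains_iff _ _).mpr (by simp [PySem.Set.mem_ofList]; exact he_l))]
      constructor
      · simp only [pvBStep, hb1, if_true]
        simp only [PySem.Dict.erase, hu, List.filter_map, Function.comp_def, hS, hadd,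
          List.filter_filter]
        refine congrArg _ (List.filter_congr ?_)
        intro k hk
        rw [Bool.eq_iff_iff]
        simp only [Bool.and_eq_true, Bool.not_eq_eq_eq_not, Bool.not_true, beq_iff_eq,
          beq_eq_false_iff_ne, ne_eq, List.count_append, List.count_singleton]
        by_cases hke : k = e
        · subst hke; simp [h1]
        · simp [hke, Ne.symm hke]
      · simp only [pvBStep, hb1, if_true]
        intro k
        have : PySem.Set.add p.2 e = p.2 ++ [e] := by
          rw [PySem.Set.add, hb2]; simp
        rw [this]
        by_cases hke : k = e
        · subst hke; simp [hd, h1, List.count_append]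
        · simp [Ne.symm hke, hd, List.count_append]
          exact fun h => absurd h hke
    · by_cases h2 : 2 ≤ l.count e
      · -- seen twice or more already: skip
        have hb1 : p.1.contains e = false := by
          cases hcc : p.1.contains e
          · rfl
          · exact absurd (hc.mp hcc) (by omega)
        have hb2 : PySem.Set.contains p.2 e = true := hs.mpr h2
        have he_l : e ∈ l := List.count_pos_iff.mp (by omega)
        have hadd : PySem.Set.add (PySem.Set.ofList l) e = PySem.Set.ofList l := by
          rw [PySem.Set.add, if_pos ((PySem.Set.contains_iff _ _).mpr (by simp [PySem.Set.mem_ofList]; exact he_l))]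
        simp only [pvBStep, hb1, hb2, Bool.false_eq_true, if_false, if_true]
        constructor
        · rw [hu, hS, hadd]
          refine congrArg _ (List.filter_congr ?_)
          intro k hk
          rw [Bool.eq_iff_iff]
          simp only [beq_iff_eq, List.count_append, List.count_singleton]
          by_cases hke : k = e
          · subst hke; rw [if_pos rfl]; omega
          · rw [if_neg (fun h : e = k => hke h.symm)]; omega
        · intro k
          by_cases hke : k = e
          · subst hke
            simp [hd, List.count_append]
            exact iff_of_true (by omega) (List.count_pos_iff.mp (by omega))
          · simp [Ne.symm hke, hd, List.count_append]
      · -- first occurrence: insert into unique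
        have h0 : l.count e = 0 := by omega
        have he_l : e ∉ l := by
          intro hmem; have := List.count_pos_iff.mpr hmem; omega
        have hb1 : p.1.contains e = false := by
          cases hcc : p.1.contains e
          · rfl
          · exact absurd (hc.mp hcc) (by omega)
        have hb2 : PySem.Set.contains p.2 e = false := by
          cases hcc : PySem.Set.contains p.2 e
          · rfl
          · exact absurd (hs.mp hcc) (by omega)
        have hadd : PySem.Set.add (PySem.Set.ofList l) e = PySem.Set.ofList l ++ [e] := by
          rw [PySem.Set.add, if_neg (by rw [PySem.Set.contains_iff, PySem.Set.mem_ofList]; exact he_l)]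
        simp only [pvBStep, hb1, hb2, Bool.false_eq_true, if_false]
        constructor
        · rw [PySem.Dict.insert, if_neg (by simp [hb1]), hS, hadd, List.filter_append]
          simp only [hu]
          rw [List.map_append]
          congr 1
          · refine congrArg _ (List.filter_congr ?_)
            intro k hk
            have hke : k ≠ e := by
              intro h; subst h; exact he_l (by simpa [PySem.Set.mem_ofList] using hk)
            rw [Bool.eq_iff_iff]
            simp [beq_iff_eq, List.count_append, Ne.symm hke]
          · simp [List.count_append, List.count_singleton, h0]
        · intro k
          by_cases hke : k = e
          · subst hke
            simp [hd, List.count_append]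
            exact iff_of_false (by omega) (fun hm => by have := List.count_pos_iff.mpr hm; omega)
          · simp [Ne.symm hke, hd, List.count_append]

lemma B_closed (coords : List (List (Int × Int × Int))) (h : ∀ f ∈ coords, 4 ≤ f.length) :
    highlight_surface_edge_alt coords
      = (PySem.Set.ofList (pvE coords)).filter (fun k => (pvE coords).count k == 1) := by
  unfold highlight_surface_edge_alt
  rw [foldl_facets (σ := PySem.Dict (List (Int × Int × Int)) Bool × PySem.Set (List (Int × Int × Int))) pvBStep coords h (PySem.Dict.empty, PySem.Set.empty), PySem.Dict.keys, (B_inv (pvE coords)).1, List.map_map]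
  simp only [Function.comp_def]
  simp

-- ===== VERDICT (by name: the statement is the Claim_ definition above) =====
theorem highlight_surface_edge_spec : Claim_equal_highlight_surface_edge := by
  intro coords _ hpre
  unfold Spec_highlight_surface_edge
  rw [A_closed coords hpre, B_closed coords hpre]
  apply List.filter_congr
  intro k _
  rcases eq_or_ne ((pvE coords).count k) 1 with hk | hk <;> simp [hk]
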